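-- pv_equiv track=rewrite | github.com/volcengine/verl | atropos/environments/intern_bootcamp/internbootcamp_lib/internbootcamp/bootcamp/dpickingstrings/dpickingstrings.py | compute_prefixes
-- ===== SOURCE A (Python) =====
-- def compute_prefixes(s):
--     sca = [0] * (len(s) + 1)
--     scb = [0] * (len(s) + 1)
--     for i in range(1, len(s) + 1):
--         char = s[i-1]
--         if char == 'A':
--             sca[i] = sca[i-1] + 1
--             scb[i] = scb[i-1]
--         else:
--             sca[i] = sca[i-1]
--             scb[i] = scb[i-1] + 1
--     return sca, scb
-- ===== SOURCE B (Python) =====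
-- def compute_prefixes(s):
--     # Event-list / two-pointer merge: first extract the sorted indices of the
--     # 'A' occurrences, then sweep i = 0..n against that index list (with a
--     # sentinel), consuming an index whenever it falls before i; the consumed
--     # count IS sca[i].  scb follows from scb[i] = i - sca[i].
--     n = len(s)
--     pos = [j for j, ch in enumerate(s) if ch == 'A']
--     pos.append(n + 1)  # sentinel: never smaller than any swept i
--     sca = []
--     k = 0
--     for i in range(n + 1):
--         if pos[k] < i:
--             k += 1
--         sca.append(k)
--     scb = [i - a for i, a in enumerate(sca)]
--     return sca, scb
-- ===== Notes on version B (the rewrite author's own statement) =====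
-- stated objective: alternative
-- what changed: B first extracts the sorted list of 'A'-occurrence indices, then builds sca by a sentinel-terminated two-pointer merge of that index list against the sweep i = 0..n (the number of consumed indices is sca[i]), and derives scb from the identity scb[i] = i - sca[i], instead of A's single loop updating two parallel accumulators with an if/else per character.
import Mathlib
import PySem

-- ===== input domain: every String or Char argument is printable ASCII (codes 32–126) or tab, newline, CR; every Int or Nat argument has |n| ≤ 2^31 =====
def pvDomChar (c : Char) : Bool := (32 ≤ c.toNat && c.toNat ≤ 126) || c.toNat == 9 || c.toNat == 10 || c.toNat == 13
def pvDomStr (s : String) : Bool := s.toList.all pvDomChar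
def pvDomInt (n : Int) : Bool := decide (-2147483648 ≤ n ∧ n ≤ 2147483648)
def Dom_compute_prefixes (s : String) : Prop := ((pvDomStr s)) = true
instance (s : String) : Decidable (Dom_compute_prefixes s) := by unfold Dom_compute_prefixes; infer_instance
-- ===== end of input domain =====

-- B replaces A's per-character double-accumulator loop by an event-list merge: it extracts
-- the sorted 'A'-index list, sweeps i = 0..n against it (sentinel-terminated) so the number
-- of consumed indices is sca[i], and derives scb[i] = i - sca[i].

-- ===== PORT A =====
-- A's loop over i = 1..len(s): reads s[i-1], extends both arrays by an if/else on two accumulators.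
def goA : List Char → Int → Int → List Int × List Int
  | [], _, _ => ([], [])
  | c :: rest, a, b =>
    if c = 'A' then
      let r := goA rest (a + 1) b
      ((a + 1) :: r.1, b :: r.2)
    else
      let r := goA rest a (b + 1)
      (a :: r.1, (b + 1) :: r.2)

def compute_prefixes (s : String) : List Int × List Int :=
  let r := goA s.toList 0 0
  ((0 : Int) :: r.1, (0 : Int) :: r.2)

-- ===== PORT B =====
-- [j for j, ch in enumerate(s) if ch == 'A']
def posOf : List Char → Int → List Int
  | [], _ => []
  | c :: rest, j => if c = 'A' then j :: posOf rest (j + 1) else posOf rest (j + 1)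

-- the sweep over i in range(n+1); state: current i, pointer value k, unconsumed index list
-- (Python keeps the whole list and an index k; the unconsumed tail pos[k:] is that state)
def sweepB : Nat → Int → Int → List Int → List Int
  | 0, _, _, _ => []
  | _ + 1, _, _, [] => []  -- unreachable: the sentinel is never consumed
  | m + 1, i, k, p :: ps =>
    if p < i then (k + 1) :: sweepB m (i + 1) (k + 1) ps
    else k :: sweepB m (i + 1) k (p :: ps)

def compute_prefixes_alt (s : String) : List Int × List Int :=
  let n := s.toList.length
  let pos := posOf s.toList 0 ++ [(n : Int) + 1]
  let sca := sweepB (n + 1) 0 0 pos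
  (sca, (PySem.List.enumerate sca).map (fun p => p.1 - p.2))

-- ===== PRECONDITION & SPEC =====
def Spec_compute_prefixes (s : String) (out : List Int × List Int) : Prop := out = compute_prefixes_alt s
instance (s : String) (out : List Int × List Int) : Decidable (Spec_compute_prefixes s out) := by unfold Spec_compute_prefixes; infer_instance

-- ===== CLAIM (what is proved, stated in full; the proofs are below) =====
def Claim_equal_compute_prefixes : Prop := ∀ (s : String), Dom_compute_prefixes s → Spec_compute_prefixes s (compute_prefixes s)

-- ===== LEMMAS AND PROOFS =====

-- proof-side characterisation: running prefix counts of 'A'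
def cnt : List Char → Int → List Int
  | [], _ => []
  | c :: rest, a =>
    let a' := a + (if c = 'A' then 1 else 0)
    a' :: cnt rest a'

theorem goA_fst (l : List Char) (a b : Int) : (goA l a b).1 = cnt l a := by
  induction l generalizing a b with
  | nil => simp [goA, cnt]
  | cons c rest ih => by_cases h : c = 'A' <;> simp [goA, cnt, h, ih]

theorem goA_snd (l : List Char) (a b : Int) :
    (goA l a b).2 = (PySem.List.enumerate (goA l a b).1 (a + b + 1)).map (fun p => p.1 - p.2) := by
  induction l generalizing a b with
  | nil => simp [goA]
  | cons c rest ih =>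
    by_cases h : c = 'A'
    · simp only [goA, h, if_true]
      rw [ih, PySem.List.enumerate_cons, List.map_cons]
      congr 1
      · omega
      · have : a + 1 + b + 1 = a + b + 1 + 1 := by ring
        rw [this]
    · simp only [goA, if_neg h]
      rw [ih, PySem.List.enumerate_cons, List.map_cons]
      congr 1
      · omega
      · have : a + (b + 1) + 1 = a + b + 1 + 1 := by ring
        rw [this]

theorem posOf_ge (l : List Char) (j : Int) : ∀ p ∈ posOf l j, j ≤ p := by
  induction l generalizing j with
  | nil => simp [posOf]
  | cons c rest ih =>
    intro p hp
    by_cases h : c = 'A' <;> simp only [posOf, h, if_true, List.mem_cons] at hp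
    · rcases hp with rfl | hp
      · exact le_refl _
      · exact le_trans (by omega) (ih (j + 1) p hp)
    · exact le_trans (by omega) (ih (j + 1) p hp)

theorem sweepB_eq (l : List Char) (i k S : Int) (hS : i + l.length ≤ S) :
    sweepB l.length (i + 1) k (posOf l i ++ [S]) = cnt l k := by
  induction l generalizing i k with
  | nil => simp [sweepB, cnt]
  | cons c rest ih =>
    by_cases h : c = 'A'
    · simp only [posOf, h, if_true, List.cons_append, List.length_cons]
      rw [sweepB, if_pos (by omega : i < i + 1)]
      rw [ih (i + 1) (k + 1) (by simp at hS ⊢; omega)]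
      simp [cnt]
    · simp only [posOf, if_neg h, List.length_cons]
      have key := ih (i + 1) k (by simp at hS ⊢; omega)
      cases hrest : posOf rest (i + 1) with
      | nil =>
        rw [hrest, List.nil_append] at key
        rw [List.nil_append]
        rw [sweepB, if_neg (by simp at hS; omega : ¬ S < i + 1), key]
        simp [cnt, h]
      | cons p ps =>
        have hp : i + 1 ≤ p := posOf_ge rest (i + 1) p (by rw [hrest]; exact List.mem_cons_self ..)
        rw [hrest, List.cons_append] at key
        rw [List.cons_append]
        rw [sweepB, if_neg (by omega : ¬ p < i + 1), key]
        simp [cnt, h]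

theorem sweep_top (l : List Char) :
    sweepB (l.length + 1) 0 0 (posOf l 0 ++ [(l.length : Int) + 1]) = (0 : Int) :: cnt l 0 := by
  have key := sweepB_eq l 0 0 ((l.length : Int) + 1) (by omega)
  cases hl : posOf l 0 with
  | nil =>
    rw [hl, List.nil_append] at key
    rw [List.nil_append]
    rw [sweepB, if_neg (by omega : ¬ (l.length : Int) + 1 < 0), key]
  | cons p ps =>
    have hp : (0 : Int) ≤ p := posOf_ge l 0 p (by rw [hl]; exact List.mem_cons_self ..)
    rw [hl, List.cons_append] at key
    rw [List.cons_append]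
    rw [sweepB, if_neg (by omega : ¬ p < 0), key]

-- ===== VERDICT (by name: the statement is the Claim_ definition above) =====
theorem compute_prefixes_spec : Claim_equal_compute_prefixes := by
  intro s _
  unfold Spec_compute_prefixes compute_prefixes compute_prefixes_alt
  simp only []
  rw [sweep_top, goA_snd, goA_fst, PySem.List.enumerate_cons, List.map_cons]
  norm_num
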